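-- pv_equiv track=rewrite | github.com/Jirapol-Pongthong/my_dev_OOD | lab2/OOD_lab2_5.py | bon
-- ===== SOURCE A (Python) =====
-- def bon(w):
-- 	a = 0
-- 	sum = set()
-- 	for i in range(len(w)):
-- 		for j in range(i + 1, len(w)):
-- 			if j < len(w) and w[i] == w[j]:
-- 				sum.add(w[i])
-- 				break
-- 	for i in sum:
-- 		a += ord(i)-96
--
-- 	a = a * 4
-- 	return a
-- ===== SOURCE B (Python) =====
-- def bon(w):
--     counts = {}
--     for c in w:
--         counts[c] = counts.get(c, 0) + 1
--     return 4 * sum(ord(c) - 96 for c, n in counts.items() if n > 1)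
-- ===== Notes on version B (the rewrite author's own statement) =====
-- stated objective: faster
-- what changed: Replaced A's nested quadratic look-ahead scan (for each i, search j>i for a duplicate) by a single counting pass building a dict of character counts and summing ord(c)-96 over characters with count > 1.
import Mathlib
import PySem

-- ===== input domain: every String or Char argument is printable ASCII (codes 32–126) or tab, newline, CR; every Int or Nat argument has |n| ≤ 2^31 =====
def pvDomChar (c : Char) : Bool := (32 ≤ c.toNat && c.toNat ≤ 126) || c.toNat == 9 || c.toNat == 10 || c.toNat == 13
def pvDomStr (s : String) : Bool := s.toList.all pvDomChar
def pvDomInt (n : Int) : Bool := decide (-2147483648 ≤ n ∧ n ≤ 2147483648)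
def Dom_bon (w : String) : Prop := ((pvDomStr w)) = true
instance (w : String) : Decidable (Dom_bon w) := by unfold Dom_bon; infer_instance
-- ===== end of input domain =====

-- B replaces A's quadratic nested look-ahead scan by a single counting pass over the
-- string (a dict of character counts), summing over the characters counted more than once.

-- ===== PORT A =====
-- inner loop 'for j in range(i+1, len(w)): if j < len(w) and w[i] == w[j]: sum.add(w[i]); break'
def bonInner (l : List Char) (i : Int) (s : PySem.Set Char) : List Int → PySem.Set Char
  | [] => s
  | j :: rest =>
      if j < (l.length : Int) ∧ PySem.List.pyGetD l i ' ' = PySem.List.pyGetD l j ' '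
      then PySem.Set.add s (PySem.List.pyGetD l i ' ')
      else bonInner l i s rest

def bon (w : String) : Int :=
  let l := w.toList
  let n : Int := (l.length : Int)
  let s :=
    (PySem.List.pyRange 0 n 1).foldl
      (fun s i => bonInner l i s (PySem.List.pyRange (i + 1) n 1)) PySem.Set.empty
  let a := s.foldl (fun a c => a + ((c.toNat : Int) - 96)) 0
  a * 4

-- ===== PORT B =====
def bon_alt (w : String) : Int :=
  let counts : PySem.Dict Char Int :=
    w.toList.foldl (fun d c => d.insert c (d.getD c 0 + 1)) PySem.Dict.empty
  4 * ((counts.items.filter (fun p => (1 : Int) < p.2)).foldl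
        (fun a p => a + ((p.1.toNat : Int) - 96)) 0)

-- ===== PRECONDITION & SPEC =====
def Spec_bon (w : String) (out : Int) : Prop := out = bon_alt w
instance (w : String) (out : Int) : Decidable (Spec_bon w out) := by unfold Spec_bon; infer_instance

-- ===== CLAIM (what is proved, stated in full; the proofs are below) =====
def Claim_equal_bon : Prop := ∀ (w : String), Dom_bon w → Spec_bon w (bon w)

-- ===== LEMMAS AND PROOFS =====

-- the inner loop adds w[i] exactly when some later index carries the same character
theorem bonInner_eq (l : List Char) (i : Int) (s : PySem.Set Char) (js : List Int) :
    bonInner l i s js =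
      if ∃ j ∈ js, j < (l.length : Int) ∧ PySem.List.pyGetD l i ' ' = PySem.List.pyGetD l j ' '
      then PySem.Set.add s (PySem.List.pyGetD l i ' ')
      else s := by
  induction js with
  | nil => simp [bonInner]
  | cons j rest ih =>
      by_cases h : j < (l.length : Int) ∧ PySem.List.pyGetD l i ' ' = PySem.List.pyGetD l j ' '
      · simp [bonInner, h]
      · simp only [bonInner, if_neg h, ih]
        congr 1
        simp only [List.mem_cons, eq_iff_iff]
        constructor
        · rintro ⟨j', hj', hc⟩; exact ⟨j', Or.inr hj', hc⟩
        · rintro ⟨j', hj' | hj', hc⟩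
          · exact absurd (hj' ▸ hc) h
          · exact ⟨j', hj', hc⟩

theorem exists_later_iff (l : List Char) (k : Nat) (hk : k < l.length) :
    (∃ j ∈ PySem.List.pyRange ((k : Int) + 1) (l.length : Int) 1,
        j < (l.length : Int) ∧ l[k] = PySem.List.pyGetD l j ' ')
      ↔ l[k] ∈ l.drop (k + 1) := by
  constructor
  · rintro ⟨j, hj, hjlt, heq⟩
    rw [PySem.List.mem_pyRange_one] at hj
    have h0 : 0 ≤ j := by omega
    rw [PySem.List.pyGetD_eq_getElem l ' ' h0 hjlt] at heq
    rw [List.mem_iff_getElem]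
    refine ⟨j.toNat - (k + 1), by rw [List.length_drop]; omega, ?_⟩
    rw [List.getElem_drop]
    have h2 : k + 1 + (j.toNat - (k + 1)) = j.toNat := by omega
    simp only [h2]
    exact heq.symm
  · intro hmem
    rw [List.mem_iff_getElem] at hmem
    obtain ⟨t, ht, hteq⟩ := hmem
    rw [List.length_drop] at ht
    refine ⟨((k + 1 + t : Nat) : Int), ?_, by push_cast; omega, ?_⟩
    · rw [PySem.List.mem_pyRange_one]; push_cast; omega
    · rw [PySem.List.pyGetD_eq_getElem l ' ' (by positivity) (by push_cast; omega)]
      rw [List.getElem_drop] at hteq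
      simp only [Int.toNat_natCast]
      exact hteq.symm

-- abbreviation used only by the proofs: the outer loop's step over a Nat index
def stepF (l : List Char) (s : PySem.Set Char) (k : Nat) : PySem.Set Char :=
  if l.getD k ' ' ∈ l.drop (k + 1) then PySem.Set.add s (l.getD k ' ') else s

theorem mem_foldl_stepF (l : List Char) (y : Char) (ks : List Nat) (s : PySem.Set Char) :
    y ∈ ks.foldl (stepF l) s ↔
      y ∈ s ∨ ∃ k ∈ ks, l.getD k ' ' ∈ l.drop (k + 1) ∧ y = l.getD k ' ' := by
  induction ks generalizing s with
  | nil => simp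
  | cons k rest ih =>
      simp only [List.foldl_cons, ih, stepF]
      split_ifs with h
      · rw [PySem.Set.mem_add]
        constructor
        · rintro ((hs | hy) | hr)
          · exact Or.inl hs
          · exact Or.inr ⟨k, by simp, h, hy⟩
          · obtain ⟨k', hk', hc⟩ := hr; exact Or.inr ⟨k', by simp [hk'], hc⟩
        · rintro (hs | ⟨k', hk', hc, hy⟩)
          · exact Or.inl (Or.inl hs)
          · rcases List.mem_cons.mp hk' with rfl | hk'
            · exact Or.inl (Or.inr hy)
            · exact Or.inr ⟨k', hk', hc, hy⟩
      · constructor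
        · rintro (hs | ⟨k', hk', hc⟩)
          · exact Or.inl hs
          · exact Or.inr ⟨k', by simp [hk'], hc⟩
        · rintro (hs | ⟨k', hk', hc, hy⟩)
          · exact Or.inl hs
          · rcases List.mem_cons.mp hk' with rfl | hk'
            · exact absurd hc h
            · exact Or.inr ⟨k', hk', hc, hy⟩

theorem nodup_foldl_stepF (l : List Char) (ks : List Nat) (s : PySem.Set Char)
    (hs : s.Nodup) : (ks.foldl (stepF l) s).Nodup := by
  induction ks generalizing s with
  | nil => exact hs
  | cons k rest ih =>
      simp only [List.foldl_cons, stepF]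
      split_ifs with h
      · exact ih _ (PySem.Set.nodup_add s _ hs)
      · exact ih _ hs

theorem exists_dup_iff (l : List Char) (y : Char) :
    (∃ k ∈ List.range l.length, l.getD k ' ' ∈ l.drop (k + 1) ∧ y = l.getD k ' ')
      ↔ List.Duplicate y l := by
  induction l with
  | nil => simp
  | cons c t ih =>
      rw [List.duplicate_cons_iff, ← ih]
      constructor
      · rintro ⟨k, hk, hc, hy⟩
        rw [List.mem_range] at hk
        cases k with
        | zero => simp_all
        | succ m =>
            right
            exact ⟨m, List.mem_range.mpr (by simpa using hk), by simpa using hc, by simpa using hy⟩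
      · rintro (⟨rfl, hy⟩ | ⟨m, hm, hc, hy⟩)
        · exact ⟨0, by simp, by simpa using hy, by simp⟩
        · rw [List.mem_range] at hm
          exact ⟨m + 1, List.mem_range.mpr (by simp only [List.length_cons] at hm ⊢; omega), by simpa using hc, by simpa using hy⟩

-- ===== VERDICT (by name: the statement is the Claim_ definition above) =====
theorem bon_spec : Claim_equal_bon := by
  intro w _
  unfold Spec_bon bon bon_alt
  set l := w.toList with hl
  simp only []
  -- B side: the counting loop is Counter(l); its duplicated keys in first-occurrence order
  rw [PySem.Dict.foldl_insert_getD_add_one_eq_counter, PySem.Dict.items_counter,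
      List.filter_map, List.foldl_map]
  -- A side: rewrite the index loop over a Nat range
  rw [PySem.List.pyRange_one 0 (l.length : Int)]
  simp only [sub_zero, Int.toNat_natCast, List.foldl_map, zero_add]
  have houter : ∀ (s : PySem.Set Char), ∀ k ∈ List.range l.length,
      bonInner l (k : Int) s (PySem.List.pyRange ((k : Int) + 1) (l.length : Int) 1) =
        stepF l s k := by
    intro s k hk
    rw [List.mem_range] at hk
    have hg : PySem.List.pyGetD l ((k : Nat) : Int) ' ' = l[k] := by
      rw [PySem.List.pyGetD_natCast, List.getD_eq_getElem l ' ' hk]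
    rw [bonInner_eq]
    simp only [hg, stepF, List.getD_eq_getElem l ' ' hk]
    rw [if_congr (exists_later_iff l k hk) rfl rfl]
  rw [PySem.List.foldl_congr_mem _ _ (stepF l) _ houter]
  -- both character lists are Nodup with membership '1 < count', hence permutations
  have hA : ((List.range l.length).foldl (stepF l) PySem.Set.empty).Perm
      ((PySem.Set.ofList l).filter
        ((fun p => decide ((1 : Int) < p.2)) ∘ fun k => (k, (l.count k : Int)))) := by
    apply (List.perm_ext_iff_of_nodup
        (nodup_foldl_stepF l _ _ (by simp [PySem.Set.empty]))
        ((PySem.Set.nodup_ofList l).filter _)).mpr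
    intro y
    rw [mem_foldl_stepF, List.mem_filter, PySem.Set.mem_ofList]
    simp only [PySem.Set.empty, List.not_mem_nil, false_or, Function.comp_apply,
      decide_eq_true_eq]
    rw [exists_dup_iff]
    have hdup : List.Duplicate y l ↔ 2 ≤ l.count y := List.duplicate_iff_two_le_count
    rw [hdup]
    constructor
    · intro h
      exact ⟨List.count_pos_iff.mp (by omega), by exact_mod_cast by omega⟩
    · rintro ⟨_, h⟩
      have : (1 : Int) < (l.count y : Int) := h
      omega
  have hsum := @List.Perm.foldl_eq _ _ (fun (a : Int) (c : Char) => a + ((c.toNat : Int) - 96))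
    _ _ ⟨by intro a b c; ring⟩ hA 0
  rw [hsum]
  ring
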